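-- pv_equiv track=rewrite | github.com/abclq/hajimi-king-pro | app/hajimi_king.py | normalize_query
-- ===== SOURCE A (Python) =====
-- def normalize_query(query: str) -> str:
--     query = " ".join(query.split())
--
--     parts = []
--     i = 0
--     while i < len(query):
--         if query[i] == '"':
--             end_quote = query.find('"', i + 1)
--             if end_quote != -1:
--                 parts.append(query[i:end_quote + 1])
--                 i = end_quote + 1
--             else:
--                 parts.append(query[i])
--                 i += 1
--         elif query[i] == ' ':
--             i += 1
--         else:
--             start = i
--             while i < len(query) and query[i] != ' ':
--                 i += 1
--             parts.append(query[start:i])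
--
--     quoted_strings = []
--     language_parts = []
--     filename_parts = []
--     path_parts = []
--     other_parts = []
--
--     for part in parts:
--         if part.startswith('"') and part.endswith('"'):
--             quoted_strings.append(part)
--         elif part.startswith('language:'):
--             language_parts.append(part)
--         elif part.startswith('filename:'):
--             filename_parts.append(part)
--         elif part.startswith('path:'):
--             path_parts.append(part)
--         elif part.strip():
--             other_parts.append(part)
--
--     normalized_parts = []
--     normalized_parts.extend(sorted(quoted_strings))
--     normalized_parts.extend(sorted(other_parts))
--     normalized_parts.extend(sorted(language_parts))
--     normalized_parts.extend(sorted(filename_parts))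
--     normalized_parts.extend(sorted(path_parts))
--
--     return " ".join(normalized_parts)
-- ===== SOURCE B (Python) =====
-- def normalize_query(query: str) -> str:
--     # bucket precedence as a total rank: quoted 0, plain 1, language: 2,
--     # filename: 3, path: 4; 5 marks a blank token, which is dropped
--     def rank(p):
--         if p.startswith('"') and p.endswith('"'):
--             return 0
--         if p.startswith('language:'):
--             return 2
--         if p.startswith('filename:'):
--             return 3
--         if p.startswith('path:'):
--             return 4
--         if p.strip():
--             return 1
--         return 5
--
--     # quote-aware tokenizer, recursive on the remaining suffix
--     def tokens(s):
--         if not s: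
--             return []
--         if s[0] == ' ':
--             return tokens(s[1:])
--         if s[0] == '"':
--             j = s.find('"', 1)
--             if j != -1:
--                 return [s[:j + 1]] + tokens(s[j + 1:])
--             return ['"'] + tokens(s[1:])
--         j = s.find(' ')
--         if j == -1:
--             return [s]
--         return [s[:j]] + tokens(s[j + 1:])
--
--     parts = [p for p in tokens(" ".join(query.split())) if rank(p) != 5]
--     return " ".join(sorted(parts, key=lambda p: (rank(p), p)))
-- ===== Notes on version B (the rewrite author's own statement) =====
-- stated objective: simpler
-- what changed: B replaces A's five bucket lists and five separate sorts by a total rank function (matching A's bucket precedence) and a single composite-key sort on (rank, token), and its quote-aware tokenizer recurses on the remaining suffix using str.find instead of A's per-character index-walking while loops.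
import Mathlib
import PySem

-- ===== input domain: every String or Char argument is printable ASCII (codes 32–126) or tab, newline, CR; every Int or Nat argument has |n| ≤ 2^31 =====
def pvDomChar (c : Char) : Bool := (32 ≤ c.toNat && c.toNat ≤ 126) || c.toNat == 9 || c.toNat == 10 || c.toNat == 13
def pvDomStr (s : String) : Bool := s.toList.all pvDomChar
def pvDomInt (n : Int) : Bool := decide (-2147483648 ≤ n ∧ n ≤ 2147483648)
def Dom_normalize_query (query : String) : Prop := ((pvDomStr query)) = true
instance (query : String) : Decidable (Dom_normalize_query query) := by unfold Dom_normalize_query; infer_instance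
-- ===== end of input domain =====

-- B replaces A's five bucket lists and five separate sorts by a total rank function and
-- ONE composite-key sort (rank, token); its tokenizer recurses on the remaining suffix
-- using str.find instead of A's per-character while loops.  Objective: simpler (and the
-- timing run measured B faster by a constant factor); same exact output.

-- ===== PORT A =====

def pvAScan (q : List Char) (i : Nat) : Nat :=
  -- inner `while i < len(query) and query[i] != ' ': i += 1`
  if h : i < q.length ∧ q[i]! ≠ ' ' then pvAScan q (i + 1) else i
termination_by q.length - i
decreasing_by have := h.1; omega

theorem pvAScan_le (q : List Char) (i : Nat) : i ≤ pvAScan q i := by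
  rw [pvAScan]
  split
  · rename_i h
    have := pvAScan_le q (i + 1)
    omega
  · omega
termination_by q.length - i
decreasing_by rename_i h; have := h.1; omega

theorem pvAScan_gt (q : List Char) (i : Nat) (h1 : i < q.length) (h2 : q[i]! ≠ ' ') :
    i < pvAScan q i := by
  rw [pvAScan, dif_pos ⟨h1, h2⟩]
  have := pvAScan_le q (i + 1)
  omega

theorem pvFindFrom_lb (q : List Char) (k : Nat) (hk : k ≤ q.length)
    (h : PySem.Chars.findFrom q ['"'] (k : Int) ≠ -1) :
    (k : Int) ≤ PySem.Chars.findFrom q ['"'] (k : Int) := by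
  rw [PySem.Chars.findFrom_natCast q ['"'] k hk] at h ⊢
  split_ifs at h ⊢ with hc
  · exact absurd rfl h
  · have := PySem.Chars.neg_one_le_find (q.drop k) ['"']
    omega

-- the main `while i < len(query):` loop of A, carrying `parts`
def pvALoop (q : List Char) (i : Nat) (parts : List (List Char)) : List (List Char) :=
  if hi : i < q.length then
    if q[i]! = '"' then
      if he : PySem.Chars.findFrom q ['"'] ((i : Int) + 1) ≠ -1 then
        pvALoop q ((PySem.Chars.findFrom q ['"'] ((i : Int) + 1)).toNat + 1)
          (parts ++ [PySem.List.slice q (some (i : Int))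
            (some (PySem.Chars.findFrom q ['"'] ((i : Int) + 1) + 1))])
      else
        pvALoop q (i + 1) (parts ++ [[q[i]!]])
    else if q[i]! = ' ' then
      pvALoop q (i + 1) parts
    else
      pvALoop q (pvAScan q i)
        (parts ++ [PySem.List.slice q (some (i : Int)) (some ((pvAScan q i : Nat) : Int))])
  else parts
termination_by q.length - i
decreasing_by
  · have hcast : ((i : Int) + 1) = (((i + 1 : Nat)) : Int) := by push_cast; ring
    rw [hcast] at he
    have := pvFindFrom_lb q (i + 1) (by omega) he
    rw [hcast]
    omega
  · omega
  · omega
  · have := pvAScan_gt q i hi (by assumption)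
    omega

-- the categorize loop: state (quoted, language, filename, path, other)
def pvStepA (acc : List (List Char) × List (List Char) × List (List Char) ×
    List (List Char) × List (List Char)) (part : List Char) :
    List (List Char) × List (List Char) × List (List Char) ×
    List (List Char) × List (List Char) :=
  match acc with
  | (qs, ls, fs, ps, os) =>
    if PySem.Chars.startswith part ['"'] && PySem.Chars.endswith part ['"'] then
      (qs ++ [part], ls, fs, ps, os)
    else if PySem.Chars.startswith part ("language:".toList) then
      (qs, ls ++ [part], fs, ps, os)
    else if PySem.Chars.startswith part ("filename:".toList) then
      (qs, ls, fs ++ [part], ps, os)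
    else if PySem.Chars.startswith part ("path:".toList) then
      (qs, ls, fs, ps ++ [part], os)
    else if PySem.Chars.strip part ≠ [] then
      (qs, ls, fs, ps, os ++ [part])
    else (qs, ls, fs, ps, os)

def normalize_query (query : String) : String :=
  let q := PySem.Chars.join [' '] (PySem.Chars.split₀ query.toList)
  let parts := pvALoop q 0 []
  match parts.foldl pvStepA ([], [], [], [], []) with
  | (qs, ls, fs, ps, os) =>
    String.mk (PySem.Chars.join [' ']
      (PySem.List.sorted qs (fun x => x) ++ PySem.List.sorted os (fun x => x) ++
       PySem.List.sorted ls (fun x => x) ++ PySem.List.sorted fs (fun x => x) ++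
       PySem.List.sorted ps (fun x => x)))

-- ===== PORT B =====

-- B's rank: quoted 0, plain 1, language: 2, filename: 3, path: 4, blank 5 (dropped)
def pvRank (p : List Char) : Int :=
  if PySem.Chars.startswith p ['"'] && PySem.Chars.endswith p ['"'] then 0
  else if PySem.Chars.startswith p ("language:".toList) then 2
  else if PySem.Chars.startswith p ("filename:".toList) then 3
  else if PySem.Chars.startswith p ("path:".toList) then 4
  else if PySem.Chars.strip p ≠ [] then 1
  else 5

theorem pvSliceFrom_len (s : List Char) (a : Int) (ha : 1 ≤ a) (hs : s ≠ []) :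
    (PySem.List.slice s (some a) none).length < s.length := by
  rw [PySem.List.slice_from s (by omega : (0:Int) ≤ a)]
  have hl : 0 < s.length := List.length_pos_iff.mpr hs
  simp only [List.length_drop]
  omega

-- B's tokenizer, recursive on the remaining suffix
def pvBTok (s : List Char) : List (List Char) :=
  match s with
  | [] => []
  | c :: t =>
    if c = ' ' then pvBTok t
    else if c = '"' then
      if hj : PySem.Chars.findFrom (c :: t) ['"'] 1 ≠ -1 then
        [PySem.List.slice (c :: t) none (some (PySem.Chars.findFrom (c :: t) ['"'] 1 + 1))] ++
          pvBTok (PySem.List.slice (c :: t) (some (PySem.Chars.findFrom (c :: t) ['"'] 1 + 1)) none)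
      else [['"']] ++ pvBTok t
    else
      if hj : PySem.Chars.find (c :: t) [' '] = -1 then [c :: t]
      else
        [PySem.List.slice (c :: t) none (some (PySem.Chars.find (c :: t) [' ']))] ++
          pvBTok (PySem.List.slice (c :: t) (some (PySem.Chars.find (c :: t) [' '] + 1)) none)
termination_by s.length
decreasing_by
  · simp
  · refine pvSliceFrom_len _ _ ?_ (by simp)
    have : (1 : Int) ≤ PySem.Chars.findFrom (c :: t) ['"'] 1 := by
      have := pvFindFrom_lb (c :: t) 1 (by simp) (by exact_mod_cast hj)
      exact_mod_cast this
    omega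
  · simp
  · refine pvSliceFrom_len _ _ ?_ (by simp)
    have := PySem.Chars.neg_one_le_find (c :: t) [' ']
    omega

def normalize_query_alt (query : String) : String :=
  let parts := (pvBTok (PySem.Chars.join [' '] (PySem.Chars.split₀ query.toList))).filter
    (fun p => decide (pvRank p ≠ 5))
  String.mk (PySem.Chars.join [' '] (PySem.List.sorted2 parts pvRank (fun p => p) false))

-- ===== PRECONDITION & SPEC =====
def Spec_normalize_query (query : String) (out : String) : Prop := out = normalize_query_alt query
instance (query : String) (out : String) : Decidable (Spec_normalize_query query out) := by
  unfold Spec_normalize_query; infer_instance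

-- ===== CLAIM (what is proved, stated in full; the proofs are below) =====
def Claim_equal_normalize_query : Prop :=
  ∀ (query : String), Dom_normalize_query query → Spec_normalize_query query (normalize_query query)


-- ===== LEMMAS AND PROOFS =====

theorem pv_singleton_prefix (a : Char) (l : List Char) : [a] <+: l ↔ l.head? = some a := by
  cases l with
  | nil => simp
  | cons b t => simp [List.cons_prefix_cons, eq_comm]

theorem pv_singleton_infix (a : Char) (s : List Char) : [a] <:+: s ↔ a ∈ s := by
  constructor
  · intro h
    exact h.mem (by simp)
  · intro h
    obtain ⟨l1, l2, rfl⟩ := List.append_of_mem h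
    exact ⟨l1, l2, by simp⟩

theorem pv_find_singleton_neg (a : Char) (s : List Char) (h : a ∉ s) :
    PySem.Chars.find s [a] = -1 :=
  (PySem.Chars.find_eq_neg_one_iff s [a]).mpr (fun hc => h ((pv_singleton_infix a s).mp hc))

theorem pv_tkw_lt (s : List Char) (p : Char → Bool) (k : Nat)
    (hk : k < (s.takeWhile p).length) :
    p (s[k]'(lt_of_lt_of_le hk (s.takeWhile_prefix p).length_le)) = true := by
  have h1 := (s.takeWhile_prefix p).getElem hk
  have hmem := List.mem_takeWhile_imp (List.getElem_mem hk)
  rw [h1] at hmem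
  exact hmem

theorem pv_tkw_at (s : List Char) (p : Char → Bool) (h : (s.takeWhile p).length < s.length) :
    p (s[(s.takeWhile p).length]'h) = false := by
  induction s with
  | nil => simp at h
  | cons c t ih =>
    by_cases hp : p c = true
    · simp only [List.takeWhile_cons, hp, if_true, List.length_cons] at h ⊢
      have h' : (t.takeWhile p).length < t.length := by omega
      have := ih h'
      simpa using this
    · simp only [List.takeWhile_cons, hp] at h ⊢
      simpa using hp

theorem pv_find_singleton_pos (a : Char) (s : List Char) (h : a ∈ s) :
    PySem.Chars.find s [a] = ((s.takeWhile (fun c => c != a)).length : Int) := by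
  set p : Char → Bool := fun c => c != a with hp
  set n := (s.takeWhile p).length with hn
  have hnle : n ≤ s.length := (s.takeWhile_prefix p).length_le
  have hnne : n ≠ s.length := by
    intro he
    have : s.takeWhile p = s := (s.takeWhile_prefix p).eq_of_length he
    have := List.takeWhile_eq_self_iff.mp this a h
    simp [hp] at this
  have hnlt : n < s.length := by omega
  have hsn : s[n]'hnlt = a := by
    have := pv_tkw_at s p hnlt
    simpa [hp] using this
  have hpre : [a] <+: s.drop n := by
    rw [pv_singleton_prefix, List.head?_drop, List.getElem?_eq_getElem hnlt, hsn]
  have hmin : ∀ k < n, ¬ [a] <+: s.drop k := by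
    intro k hk hc
    have hkl : k < s.length := by omega
    rw [pv_singleton_prefix, List.head?_drop, List.getElem?_eq_getElem hkl] at hc
    have := pv_tkw_lt s p k (by omega)
    simp only [Option.some.injEq] at hc
    simp [hp, hc] at this
  have h0 : 0 ≤ PySem.Chars.find s [a] :=
    (PySem.Chars.find_nonneg_iff s [a]).mpr ((pv_singleton_infix a s).mpr h)
  obtain ⟨hfp, hfm⟩ := PySem.Chars.find_spec h0
  set m := (PySem.Chars.find s [a]).toNat with hm
  have h1 : ¬ m < n := fun hc => hmin m hc hfp
  have h2 : ¬ n < m := fun hc => hfm n hc hpre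
  have : m = n := by omega
  omega

theorem pvAScan_eq (q : List Char) (i : Nat) (h : i ≤ q.length) :
    pvAScan q i = i + ((q.drop i).takeWhile (fun c => c != ' ')).length := by
  rw [pvAScan]
  by_cases hc : i < q.length ∧ q[i]! ≠ ' '
  · rw [dif_pos hc]
    obtain ⟨h1, h2⟩ := hc
    have hg : q[i]! = q[i] := getElem!_pos q i h1
    have hd : q.drop i = q[i] :: q.drop (i + 1) := List.drop_eq_getElem_cons h1
    rw [pvAScan_eq q (i + 1) (by omega), hd, List.takeWhile_cons]
    have hb : (q[i] != ' ') = true := by rw [hg] at h2; simpa using h2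
    simp only [hb, if_true, List.length_cons]
    omega
  · rw [dif_neg hc]
    rw [not_and_or, not_not] at hc
    have hc' : i < q.length → q[i]! = ' ' := by
      intro h1
      rcases hc with h | h
      · omega
      · exact h
    by_cases h1 : i < q.length
    · have h2 := hc' h1
      have hg : q[i]! = q[i] := getElem!_pos q i h1
      have hd : q.drop i = q[i] :: q.drop (i + 1) := List.drop_eq_getElem_cons h1
      rw [hd, List.takeWhile_cons]
      have hb : (q[i] != ' ') = false := by rw [hg] at h2; simpa using h2
      simp [hb]
    · have hd : q.drop i = [] := by rw [List.drop_eq_nil_iff]; omega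
      simp [hd]
termination_by q.length - i
decreasing_by have := hc.1; omega

theorem pv_tok_eq (q : List Char) (i : Nat) (parts : List (List Char)) :
    pvALoop q i parts = parts ++ pvBTok (q.drop i) := by
  rw [pvALoop]
  by_cases hi : i < q.length
  case neg =>
    rw [dif_neg hi]
    have hd : q.drop i = [] := by rw [List.drop_eq_nil_iff]; omega
    rw [hd]
    simp [pvBTok]
  case pos =>
    rw [dif_pos hi]
    have hg : q[i]! = q[i] := getElem!_pos q i hi
    have hd : q.drop i = q[i] :: q.drop (i + 1) := List.drop_eq_getElem_cons hi
    by_cases hq : q[i] = '"'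
    · rw [if_pos (by rw [hg]; exact hq)]
      have hA : PySem.Chars.findFrom q ['"'] ((i : Int) + 1) =
          (if PySem.Chars.find (q.drop (i + 1)) ['"'] = -1 then -1
           else ((i + 1 : Nat) : Int) + PySem.Chars.find (q.drop (i + 1)) ['"']) := by
        rw [show ((i : Int) + 1) = (((i + 1 : Nat)) : Int) by push_cast; ring]
        exact PySem.Chars.findFrom_natCast q ['"'] (i + 1) (by omega)
      have hB : PySem.Chars.findFrom (q[i] :: q.drop (i + 1)) ['"'] 1 =
          (if PySem.Chars.find (q.drop (i + 1)) ['"'] = -1 then -1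
           else 1 + PySem.Chars.find (q.drop (i + 1)) ['"']) := by
        have h1 := PySem.Chars.findFrom_natCast (q[i] :: q.drop (i + 1)) ['"'] 1 (by simp; omega)
        simpa using h1
      rw [hq] at hB
      by_cases hf : PySem.Chars.find (q.drop (i + 1)) ['"'] = -1
      · rw [dif_neg (by rw [hA, if_pos hf]; simp)]
        rw [pv_tok_eq q (i + 1) (parts ++ [[q[i]!]])]
        have hBtok : pvBTok ('"' :: q.drop (i + 1)) = [['"']] ++ pvBTok (q.drop (i + 1)) := by
          simp only [pvBTok]
          rw [if_pos trivial, dif_neg (by rw [hB, if_pos hf]; simp)]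
          rw [if_neg (by decide : ¬('"' : Char) = ' ')]
        rw [hg, hq, hd, hq, hBtok]
        simp
      · have hf0 : 0 ≤ PySem.Chars.find (q.drop (i + 1)) ['"'] := by
          have := PySem.Chars.neg_one_le_find (q.drop (i + 1)) ['"']
          omega
        set f := PySem.Chars.find (q.drop (i + 1)) ['"'] with hfd
        have he : PySem.Chars.findFrom q ['"'] ((i : Int) + 1) = ((i + 1 : Nat) : Int) + f := by
          rw [hA, if_neg hf]
        rw [dif_pos (by rw [he]; omega)]
        rw [pv_tok_eq q ((PySem.Chars.findFrom q ['"'] ((i : Int) + 1)).toNat + 1) _]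
        have htn : (PySem.Chars.findFrom q ['"'] ((i : Int) + 1)).toNat + 1 = i + (f.toNat + 2) := by
          rw [he]; omega
        have hslA : PySem.List.slice q (some (i : Int))
            (some (PySem.Chars.findFrom q ['"'] ((i : Int) + 1) + 1)) =
            (q.drop i).take (f.toNat + 2) := by
          rw [he, show ((i + 1 : Nat) : Int) + f + 1 = ((i + (f.toNat + 2) : Nat) : Int) by omega]
          rw [PySem.List.slice_natCast q i (i + (f.toNat + 2))]
          congr 1
          omega
        have hBtok : pvBTok ('"' :: q.drop (i + 1)) =
            [(q.drop i).take (f.toNat + 2)] ++ pvBTok (q.drop (i + (f.toNat + 2))) := by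
          simp only [pvBTok]
          rw [if_pos trivial, dif_pos (by rw [hB, if_neg hf]; omega)]
          rw [if_neg (by decide : ¬('"' : Char) = ' ')]
          rw [hB, if_neg hf]
          have hj1 : (1 : Int) + f + 1 = ((f.toNat + 2 : Nat) : Int) := by omega
          rw [hj1]
          rw [show ('"' : Char) :: q.drop (i + 1) = q.drop i by rw [hd, hq]]
          rw [PySem.List.slice_to (q.drop i) (by omega : (0:Int) ≤ ((f.toNat + 2 : Nat) : Int)),
            PySem.List.slice_from (q.drop i) (by omega : (0:Int) ≤ ((f.toNat + 2 : Nat) : Int))]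
          rw [Int.toNat_natCast, List.drop_drop]
        rw [htn, hd, hq, hBtok]
        rw [hslA]
        simp
    · by_cases hsp : q[i] = ' '
      · rw [if_neg (by rw [hg]; exact hq), if_pos (by rw [hg]; exact hsp)]
        rw [pv_tok_eq q (i + 1) parts, hd]
        rw [show pvBTok (q[i] :: q.drop (i + 1)) = pvBTok (q.drop (i + 1)) by
          rw [pvBTok]; simp [hsp]]
      · rw [if_neg (by rw [hg]; exact hq), if_neg (by rw [hg]; exact hsp)]
        set n := ((q.drop i).takeWhile (fun c => c != ' ')).length with hn
        have hscan : pvAScan q i = i + n := pvAScan_eq q i (by omega)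
        have hnle : n ≤ (q.drop i).length := (List.takeWhile_prefix _).length_le
        have hlen : (q.drop i).length = q.length - i := List.length_drop
        by_cases hmem : ' ' ∈ q.drop i
        · have hfind : PySem.Chars.find (q.drop i) [' '] = (n : Int) :=
            pv_find_singleton_pos ' ' (q.drop i) hmem
          have hne : n ≠ (q.drop i).length := by
            intro he
            have h1 : (q.drop i).takeWhile (fun c => c != ' ') = q.drop i :=
              (List.takeWhile_prefix _).eq_of_length he
            have h2 := List.takeWhile_eq_self_iff.mp h1 ' ' hmem
            simp at h2
          have hnlt : n < (q.drop i).length := by omega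
          have hat : (q.drop i)[n]'hnlt = ' ' := by
            have h1 := pv_tkw_at (q.drop i) (fun c => c != ' ') hnlt
            simpa using h1
          have hilt : i + n < q.length := by omega
          have hqn : q[i + n]'hilt = ' ' := by
            rw [← hat]
            exact (List.getElem_drop).symm
          have hslA : PySem.List.slice q (some (i : Int)) (some ((pvAScan q i : Nat) : Int)) =
              (q.drop i).take n := by
            rw [hscan, PySem.List.slice_natCast q i (i + n)]
            congr 1
            omega
          rw [hslA, hscan, pvALoop, dif_pos hilt]
          have hg2 : q[i + n]! = ' ' := by rw [getElem!_pos q (i + n) hilt, hqn]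
          rw [if_neg (by rw [hg2]; decide), if_pos hg2]
          rw [pv_tok_eq q (i + n + 1) (parts ++ [(q.drop i).take n])]
          have hBtok : pvBTok (q.drop i) = [(q.drop i).take n] ++ pvBTok (q.drop (i + n + 1)) := by
            rw [hd]
            simp only [pvBTok]
            rw [if_neg hsp, if_neg hq]
            rw [show q[i] :: q.drop (i + 1) = q.drop i from hd.symm]
            rw [dif_neg (by rw [hfind]; omega)]
            rw [hfind]
            rw [PySem.List.slice_to (q.drop i) (by omega : (0 : Int) ≤ (n : Int)),
              PySem.List.slice_from (q.drop i) (by omega : (0 : Int) ≤ (n : Int) + 1)]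
            rw [Int.toNat_natCast, show ((n : Int) + 1).toNat = n + 1 from by omega, List.drop_drop]
            rw [show i + (n + 1) = i + n + 1 from by omega]
          rw [hBtok]
          simp
        · have hfind : PySem.Chars.find (q.drop i) [' '] = -1 :=
            pv_find_singleton_neg ' ' (q.drop i) hmem
          have hall : (q.drop i).takeWhile (fun c => c != ' ') = q.drop i := by
            rw [List.takeWhile_eq_self_iff]
            intro x hx
            simp only [bne_iff_ne, ne_eq]
            intro he
            exact hmem (he ▸ hx)
          have hneq : n = (q.drop i).length := by rw [hn, hall]
          have hslA : PySem.List.slice q (some (i : Int)) (some ((pvAScan q i : Nat) : Int)) =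
              q.drop i := by
            rw [hscan, PySem.List.slice_natCast q i (i + n)]
            rw [show i + n - i = n from by omega, hneq, List.take_length]
          rw [hslA, hscan, pvALoop, dif_neg (by omega)]
          have hBtok : pvBTok (q.drop i) = [q.drop i] := by
            rw [hd]
            simp only [pvBTok]
            rw [if_neg hsp, if_neg hq]
            rw [show q[i] :: q.drop (i + 1) = q.drop i from hd.symm, dif_pos hfind]
          rw [hBtok]

termination_by q.length - i
decreasing_by all_goals omega

theorem pv_cat_gen (parts : List (List Char)) :
    ∀ qs ls fs ps os, parts.foldl pvStepA (qs, ls, fs, ps, os) =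
      (qs ++ parts.filter (fun p => pvRank p == 0), ls ++ parts.filter (fun p => pvRank p == 2),
       fs ++ parts.filter (fun p => pvRank p == 3), ps ++ parts.filter (fun p => pvRank p == 4),
       os ++ parts.filter (fun p => pvRank p == 1)) := by
  induction parts with
  | nil => simp
  | cons p rest ih =>
    intro qs ls fs ps os
    simp only [List.foldl_cons, List.filter_cons]
    by_cases h1 : (PySem.Chars.startswith p ['"'] && PySem.Chars.endswith p ['"']) = true
    · simp [pvStepA, pvRank, h1, ih, List.append_assoc]
    · by_cases h2 : PySem.Chars.startswith p ['l','a','n','g','u','a','g','e',':'] = true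
      · simp [pvStepA, pvRank, h1, h2, ih, List.append_assoc]
      · by_cases h3 : PySem.Chars.startswith p ['f','i','l','e','n','a','m','e',':'] = true
        · simp [pvStepA, pvRank, h1, h2, h3, ih, List.append_assoc]
        · by_cases h4 : PySem.Chars.startswith p ['p','a','t','h',':'] = true
          · simp [pvStepA, pvRank, h1, h2, h3, h4, ih, List.append_assoc]
          · by_cases h5 : PySem.Chars.strip p = []
            · simp [pvStepA, pvRank, h1, h2, h3, h4, h5, ih, List.append_assoc]
            · simp [pvStepA, pvRank, h1, h2, h3, h4, h5, ih, List.append_assoc]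

theorem pv_cat_eq (parts : List (List Char)) :
    parts.foldl pvStepA ([], [], [], [], []) =
      (parts.filter (fun p => pvRank p == 0), parts.filter (fun p => pvRank p == 2),
       parts.filter (fun p => pvRank p == 3), parts.filter (fun p => pvRank p == 4),
       parts.filter (fun p => pvRank p == 1)) := by
  simpa using pv_cat_gen parts [] [] [] [] []

theorem pvRank_cases (p : List Char) : pvRank p = 0 ∨ pvRank p = 1 ∨ pvRank p = 2 ∨
    pvRank p = 3 ∨ pvRank p = 4 ∨ pvRank p = 5 := by
  unfold pvRank; split_ifs <;> simp

def pvB (a b : List Char) : Bool :=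
  decide (pvRank a < pvRank b) || (!decide (pvRank b < pvRank a) && decide (a < b))

theorem sorted2_eq_foldl (xs : List (List Char)) :
    PySem.List.sorted2 xs pvRank (fun p => p) false =
      xs.foldl (fun acc x => PySem.List.insertBy pvB x acc) [] := rfl

theorem insertBy_append_left (b : List Char → List Char → Bool) (x : List Char)
    (ys zs : List (List Char)) (h : ∀ y ∈ ys, b x y = false) :
    PySem.List.insertBy b x (ys ++ zs) = ys ++ PySem.List.insertBy b x zs := by
  induction ys with
  | nil => simp
  | cons y t ih =>
    simp only [List.cons_append, PySem.List.insertBy, h y (by simp)]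
    simp only [Bool.false_eq_true, if_false, List.cons.injEq, true_and]
    exact ih (fun y hy => h y (by simp [hy]))

theorem insertBy_append_right (b : List Char → List Char → Bool) (x : List Char)
    (ys zs : List (List Char)) (h : ∀ z ∈ zs, b x z = true) :
    PySem.List.insertBy b x (ys ++ zs) = PySem.List.insertBy b x ys ++ zs := by
  induction ys with
  | nil =>
    cases zs with
    | nil => simp [PySem.List.insertBy]
    | cons z t => simp [PySem.List.insertBy, h z (by simp)]
  | cons y t ih =>
    by_cases hb : b x y = true
    · simp [PySem.List.insertBy, hb]
    · simp only [List.cons_append, PySem.List.insertBy, hb]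
      simp only [Bool.false_eq_true, if_false, List.cons_append, List.cons.injEq, true_and]
      exact ih
  
theorem insertBy_congr (b b' : List Char → List Char → Bool) (x : List Char)
    (ys : List (List Char)) (h : ∀ y ∈ ys, b x y = b' x y) :
    PySem.List.insertBy b x ys = PySem.List.insertBy b' x ys := by
  induction ys with
  | nil => rfl
  | cons y t ih =>
    simp only [PySem.List.insertBy, h y (by simp)]
    split_ifs <;> simp [ih (fun y hy => h y (by simp [hy]))]

def pvS (r : Int) (xs : List (List Char)) : List (List Char) :=
  PySem.List.sorted (xs.filter (fun p => pvRank p == r)) (fun x => x)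

theorem pvS_mem (r : Int) (xs : List (List Char)) (y : List Char) (h : y ∈ pvS r xs) :
    pvRank y = r := by
  rw [pvS, PySem.List.mem_sorted] at h
  simpa using (List.mem_filter.mp h).2

theorem pvS_append_eq (r : Int) (xs : List (List Char)) (x : List Char) (h : pvRank x = r) :
    pvS r (xs ++ [x]) =
      PySem.List.insertBy (fun a b => decide (a < b)) x (pvS r xs) := by
  simp only [pvS, List.filter_append, List.filter_cons, List.filter_nil, h, beq_self_eq_true,
    if_true, PySem.List.sorted_eq_foldl_insertBy, List.foldl_append, List.foldl_cons,
    List.foldl_nil]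

theorem pvS_append_ne (r : Int) (xs : List (List Char)) (x : List Char) (h : pvRank x ≠ r) :
    pvS r (xs ++ [x]) = pvS r xs := by
  have : (pvRank x == r) = false := by simpa using h
  simp [pvS, List.filter_append, List.filter_cons, this]

theorem pvB_lt (x y : List Char) (h : pvRank x < pvRank y) : pvB x y = true := by
  simp [pvB, h]

theorem pvB_gt (x y : List Char) (h : pvRank y < pvRank x) : pvB x y = false := by
  have h1 : ¬ pvRank x < pvRank y := by omega
  simp [pvB, h1, h]

theorem pvB_rank_eq (x y : List Char) (h : pvRank x = pvRank y) :
    pvB x y = decide (x < y) := by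
  have h1 : ¬ pvRank x < pvRank y := by omega
  have h2 : ¬ pvRank y < pvRank x := by omega
  simp [pvB, h1, h2]

theorem pv_sort5 (xs : List (List Char)) (hx : ∀ p ∈ xs, pvRank p ≠ 5) :
    xs.foldl (fun acc x => PySem.List.insertBy pvB x acc) [] =
      pvS 0 xs ++ pvS 1 xs ++ pvS 2 xs ++ pvS 3 xs ++ pvS 4 xs := by
  induction xs using List.reverseRecOn with
  | nil => simp [pvS, PySem.List.sorted]
  | append_singleton ys x ih =>
    have hys : ∀ p ∈ ys, pvRank p ≠ 5 := fun p hp => hx p (by simp [hp])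
    have hxr : pvRank x ≠ 5 := hx x (by simp)
    rw [List.foldl_append, List.foldl_cons, List.foldl_nil, ih hys]
    rcases pvRank_cases x with h|h|h|h|h|h
    · rw [pvS_append_eq 0 ys x h, pvS_append_ne 1 ys x (by omega), pvS_append_ne 2 ys x (by omega),
        pvS_append_ne 3 ys x (by omega), pvS_append_ne 4 ys x (by omega)]
      simp only [List.append_assoc]
      rw [insertBy_append_right _ _ _ _ ?hq, insertBy_congr pvB _ _ _ ?hm]
      case hq =>
        intro z hz
        simp only [List.mem_append] at hz
        rcases hz with h1|h1|h1|h1 <;>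
          [exact pvB_lt x z (by rw [h, pvS_mem 1 ys z h1]; norm_num);
           exact pvB_lt x z (by rw [h, pvS_mem 2 ys z h1]; norm_num);
           exact pvB_lt x z (by rw [h, pvS_mem 3 ys z h1]; norm_num);
           exact pvB_lt x z (by rw [h, pvS_mem 4 ys z h1]; norm_num)]
      case hm =>
        intro y hy
        exact pvB_rank_eq x y (by rw [h, pvS_mem 0 ys y hy])
    · rw [pvS_append_ne 0 ys x (by omega), pvS_append_eq 1 ys x h, pvS_append_ne 2 ys x (by omega), pvS_append_ne 3 ys x (by omega), pvS_append_ne 4 ys x (by omega)]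
      simp only [List.append_assoc]
      rw [insertBy_append_left _ _ _ _ (fun y hy => pvB_gt x y (by rw [h, pvS_mem 0 ys y hy]; norm_num))]
      rw [insertBy_append_right _ _ _ _ ?hq1, insertBy_congr pvB _ _ _ ?hm1]
      case hq1 =>
        intro z hz
        simp only [List.mem_append] at hz
        rcases hz with h1|h1|h1 <;>
          [exact pvB_lt x z (by rw [h, pvS_mem 2 ys z h1]; norm_num);
           exact pvB_lt x z (by rw [h, pvS_mem 3 ys z h1]; norm_num);
           exact pvB_lt x z (by rw [h, pvS_mem 4 ys z h1]; norm_num)]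
      case hm1 =>
        intro y hy
        exact pvB_rank_eq x y (by rw [h, pvS_mem 1 ys y hy])
    · rw [pvS_append_ne 0 ys x (by omega), pvS_append_ne 1 ys x (by omega), pvS_append_eq 2 ys x h, pvS_append_ne 3 ys x (by omega), pvS_append_ne 4 ys x (by omega)]
      simp only [List.append_assoc]
      rw [insertBy_append_left _ _ _ _ (fun y hy => pvB_gt x y (by rw [h, pvS_mem 0 ys y hy]; norm_num))]
      rw [insertBy_append_left _ _ _ _ (fun y hy => pvB_gt x y (by rw [h, pvS_mem 1 ys y hy]; norm_num))]
      rw [insertBy_append_right _ _ _ _ ?hq2, insertBy_congr pvB _ _ _ ?hm2]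
      case hq2 =>
        intro z hz
        simp only [List.mem_append] at hz
        rcases hz with h1|h1 <;>
          [exact pvB_lt x z (by rw [h, pvS_mem 3 ys z h1]; norm_num);
           exact pvB_lt x z (by rw [h, pvS_mem 4 ys z h1]; norm_num)]
      case hm2 =>
        intro y hy
        exact pvB_rank_eq x y (by rw [h, pvS_mem 2 ys y hy])
    · rw [pvS_append_ne 0 ys x (by omega), pvS_append_ne 1 ys x (by omega), pvS_append_ne 2 ys x (by omega), pvS_append_eq 3 ys x h, pvS_append_ne 4 ys x (by omega)]
      simp only [List.append_assoc]
      rw [insertBy_append_left _ _ _ _ (fun y hy => pvB_gt x y (by rw [h, pvS_mem 0 ys y hy]; norm_num))]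
      rw [insertBy_append_left _ _ _ _ (fun y hy => pvB_gt x y (by rw [h, pvS_mem 1 ys y hy]; norm_num))]
      rw [insertBy_append_left _ _ _ _ (fun y hy => pvB_gt x y (by rw [h, pvS_mem 2 ys y hy]; norm_num))]
      rw [insertBy_append_right _ _ _ _ ?hq3, insertBy_congr pvB _ _ _ ?hm3]
      case hq3 =>
        intro z hz
        simp only [List.mem_append] at hz
        exact pvB_lt x z (by rw [h, pvS_mem 4 ys z hz]; norm_num)
      case hm3 =>
        intro y hy
        exact pvB_rank_eq x y (by rw [h, pvS_mem 3 ys y hy])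
    · rw [pvS_append_ne 0 ys x (by omega), pvS_append_ne 1 ys x (by omega), pvS_append_ne 2 ys x (by omega), pvS_append_ne 3 ys x (by omega), pvS_append_eq 4 ys x h]
      simp only [List.append_assoc]
      rw [insertBy_append_left _ _ _ _ (fun y hy => pvB_gt x y (by rw [h, pvS_mem 0 ys y hy]; norm_num))]
      rw [insertBy_append_left _ _ _ _ (fun y hy => pvB_gt x y (by rw [h, pvS_mem 1 ys y hy]; norm_num))]
      rw [insertBy_append_left _ _ _ _ (fun y hy => pvB_gt x y (by rw [h, pvS_mem 2 ys y hy]; norm_num))]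
      rw [insertBy_append_left _ _ _ _ (fun y hy => pvB_gt x y (by rw [h, pvS_mem 3 ys y hy]; norm_num))]
      rw [insertBy_congr pvB (fun a b => decide (a < b)) x _ (fun y hy => pvB_rank_eq x y (by rw [h, pvS_mem 4 ys y hy]))]
    · exact absurd h hxr

theorem pv_filter_restrict (parts : List (List Char)) (r : Int) (hr : r ≠ 5) :
    (parts.filter (fun p => decide (pvRank p ≠ 5))).filter (fun p => pvRank p == r) =
      parts.filter (fun p => pvRank p == r) := by
  induction parts with
  | nil => simp
  | cons p t ih =>
    simp only [List.filter_cons]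
    by_cases h5 : pvRank p = 5
    · rw [show decide (pvRank p ≠ 5) = false by simp [h5]]
      rw [show (pvRank p == r) = false by rw [h5]; simpa using fun hh => hr hh.symm]
      simp only [Bool.false_eq_true, if_false]
      rw [ih]
    · rw [show decide (pvRank p ≠ 5) = true by simp [h5]]
      simp only [if_true]
      rw [List.filter_cons]
      by_cases h : pvRank p = r
      · rw [show (pvRank p == r) = true by simp [h]]
        simp only [if_true]
        rw [ih]
      · rw [show (pvRank p == r) = false by simpa using h]
        simp only [Bool.false_eq_true, if_false]
        rw [ih]

theorem pv_sort_eq (parts : List (List Char)) :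
    PySem.List.sorted2 (parts.filter (fun p => decide (pvRank p ≠ 5))) pvRank (fun p => p) false =
      PySem.List.sorted (parts.filter (fun p => pvRank p == 0)) (fun x => x) ++
      PySem.List.sorted (parts.filter (fun p => pvRank p == 1)) (fun x => x) ++
      PySem.List.sorted (parts.filter (fun p => pvRank p == 2)) (fun x => x) ++
      PySem.List.sorted (parts.filter (fun p => pvRank p == 3)) (fun x => x) ++
      PySem.List.sorted (parts.filter (fun p => pvRank p == 4)) (fun x => x) := by
  rw [sorted2_eq_foldl]
  rw [pv_sort5 _ (fun p hp => by simpa using (List.mem_filter.mp hp).2)]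
  simp only [pvS]
  rw [pv_filter_restrict parts 0 (by omega), pv_filter_restrict parts 1 (by omega),
    pv_filter_restrict parts 2 (by omega), pv_filter_restrict parts 3 (by omega),
    pv_filter_restrict parts 4 (by omega)]

-- ===== VERDICT (by name: the statement is the Claim_ definition above) =====
theorem normalize_query_spec : Claim_equal_normalize_query := by
  intro query _
  unfold Spec_normalize_query normalize_query normalize_query_alt
  have htok := pv_tok_eq (PySem.Chars.join [' '] (PySem.Chars.split₀ query.toList)) 0 []
  simp only [List.drop_zero, List.nil_append] at htok
  simp only [htok, pv_cat_eq, pv_sort_eq]
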